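-- pv_equiv track=rewrite | github.com/donghyeon95/Algorithm-study | Programmers/389481. 봉인된 주문/Felix.py | solution
-- ===== SOURCE A (Python) =====
-- from collections import defaultdict
-- from typing import List, Tuple
--
-- CHARS = list('abcdefghijklmnopqrstuvwxyz')
--
-- def solution(n: int, bans: List[str]) -> str:
--
--     len_bans = defaultdict(list)
--
--     for ban in bans:
--         len_bans[len(ban)].append(ban)
--
--     bans = len_bans
--
--     turn = 0
--
--     for length in range(1, 1_000_000):
--         rng = 26 ** length - len(len_bans[length])
--
--         if n <= turn + rng:
--             break
--
--         turn += rng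
--
--     def define_char(length: int, pos: int, left: int, bans: List[str]) -> Tuple[str, int, List[str]]:
--         ban_idx = 0
--
--         if pos == 1:
--             pass
--
--         for i in range(26):
--             char = CHARS[i]
--             new = 26 ** (pos-1)
--
--             while ban_idx < len(bans):
--                 if char < bans[ban_idx][length-pos]:
--                     break
--                 new -= 1
--                 ban_idx += 1
--
--             if left <= new:
--                 break
--             left -= new
--
--         return char, left, list(filter(lambda ban: ban[length - pos] == char, bans))
--
--     ret = []
--     left = n - turn
--     bans = sorted(len_bans[length])
--
--     for pos in range(length, 0, -1):
--         char, left, bans = define_char(length, pos, left, bans)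
--         ret.append(char)
--
--     return ''.join(ret)
-- ===== SOURCE B (Python) =====
-- def solution(n, bans):
--     groups = {}
--     for ban in bans:
--         groups.setdefault(len(ban), []).append(ban)
--
--     turn = 0
--     for length in range(1, 1_000_000):
--         rng = 26 ** length - len(groups.get(length, []))
--         if n <= turn + rng:
--             break
--         turn += rng
--
--     left = n - turn
--     group = groups.get(length, [])
--
--     out = []
--     for pos in range(length, 0, -1):
--         k = length - pos
--         size = 26 ** (pos - 1)
--         prev = 0
--         for i in range(26):
--             c = chr(97 + i)
--             used = sum(b[k] <= c for b in group)
--             avail = size - (used - prev)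
--             if left <= avail:
--                 break
--             left -= avail
--             prev = used
--         out.append(c)
--         group = [b for b in group if b[k] == c]
--     return ''.join(out)
-- ===== Notes on version B (the rewrite author's own statement) =====
-- stated objective: alternative
-- what changed: A sorts the bans of the chosen length and picks each output character by scanning the sorted list with a persistent index pointer (an inner while per candidate character); B never sorts: per position it treats each candidate character as an interval and counts, with a running previous total, how many bans have a character at that position at most the candidate, so the sort and the pointer scan disappear.
import Mathlib
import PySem

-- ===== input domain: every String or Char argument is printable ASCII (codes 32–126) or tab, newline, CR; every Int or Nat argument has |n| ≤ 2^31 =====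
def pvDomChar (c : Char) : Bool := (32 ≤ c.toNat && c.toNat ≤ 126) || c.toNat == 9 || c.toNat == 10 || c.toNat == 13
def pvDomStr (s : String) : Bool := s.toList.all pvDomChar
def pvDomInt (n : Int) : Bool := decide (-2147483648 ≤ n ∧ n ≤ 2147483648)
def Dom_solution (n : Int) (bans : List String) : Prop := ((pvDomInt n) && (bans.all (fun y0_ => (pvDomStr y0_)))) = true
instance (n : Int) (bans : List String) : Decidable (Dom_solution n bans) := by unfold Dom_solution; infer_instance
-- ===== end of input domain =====

-- B drops A's sort of the bans and the per-position pointer scan over the sorted list: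
-- per position it counts, with a running previous total, the bans whose character at that
-- position is at most the candidate character (objective: alternative).


-- ===== PORT A =====
-- CHARS = list('abcdefghijklmnopqrstuvwxyz')
def pvCHARS : List Char :=
  ['a','b','c','d','e','f','g','h','i','j','k','l','m',
   'n','o','p','q','r','s','t','u','v','w','x','y','z']

-- shared by both ports (Source A and Source B contain this code verbatim):
-- len_bans grouping loop (defaultdict(list) append / setdefault append — same association list)
def pvGroup (bans : List String) : PySem.Dict Int (List String) :=
  bans.foldl (fun d ban => d.modify (PySem.Str.len ban) [] (· ++ [ban])) PySem.Dict.empty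

-- shared by both ports: 'for length in range(1, 1_000_000): …' with break; the remaining range is
-- the first argument, `turn` the second, the loop variable's last value the third (the bare range
-- is nonempty, so the initial `last` is never returned).  26 ** length is ported as
-- 26 ^ length.toNat — exact, every length in the range is ≥ 1.
def pvSelectGo (n : Int) (d : PySem.Dict Int (List String)) :
    List Int → Int → Int → Int × Int
  | [], turn, last => (last, turn)
  | l :: rest, turn, _ =>
    let rng : Int := 26 ^ l.toNat - PySem.List.len (d.getD l [])
    if n ≤ turn + rng then (l, turn) else pvSelectGo n d rest (turn + rng) l

def pvSelect (n : Int) (d : PySem.Dict Int (List String)) : Int × Int :=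
  pvSelectGo n d (PySem.List.pyRange 1 1000000 1) 0 1

-- define_char's inner 'while ban_idx < len(bans): …': ban_idx is represented by the remaining
-- suffix of the sorted ban list (it only moves forward).  bans[ban_idx][length-pos] is ported with
-- pyGet?/getD: the index is always in range (every ban in the list has exactly `length` characters
-- and 1 ≤ pos ≤ length), so the default is never used.
def pvWhileA (char : Char) (k : Int) : List String → Int → List String × Int
  | [], new => ([], new)
  | ban :: rest, new =>
    if char < (PySem.Str.pyGet? ban k).getD 'a' then (ban :: rest, new)
    else pvWhileA char k rest (new - 1)

-- define_char's 'for i in range(26): …' with break; returns (char, left) (the Python `char`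
-- variable before its first assignment is represented by the dummy last argument — range(26)
-- is nonempty, so it is overwritten before any use).  26 ** (pos-1) is ported as
-- 26 ^ (pos-1).toNat — exact, pos ≥ 1 on every call.
def pvForA (length pos : Int) : List Int → Int → List String → Char → Char × Int
  | [], left, _, char => (char, left)
  | i :: rest, left, suffix, _ =>
    let char := (PySem.List.pyGet? pvCHARS i).getD 'a'
    let new : Int := 26 ^ (pos - 1).toNat
    let r := pvWhileA char (length - pos) suffix new
    if left ≤ r.2 then (char, left)
    else pvForA length pos rest (left - r.2) r.1 char

-- def define_char(length, pos, left, bans): the final filter runs over the full `bans` parameter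
def pvDefineChar (length pos left : Int) (bans : List String) : Char × Int × List String :=
  let r := pvForA length pos (PySem.List.pyRange 0 26 1) left bans 'a'
  (r.1, r.2, bans.filter (fun ban => (PySem.Str.pyGet? ban (length - pos)).getD 'a' == r.1))

-- 'for pos in range(length, 0, -1): … ret.append(char)'
def pvPosLoopA (length : Int) : List Int → Int → List String → List Char → List Char
  | [], _, _, ret => ret
  | pos :: rest, left, bans, ret =>
    let r := pvDefineChar length pos left bans
    pvPosLoopA length rest r.2.1 r.2.2 (ret ++ [r.1])

def solution (n : Int) (bans : List String) : String :=
  let d := pvGroup bans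
  let lt := pvSelect n d
  let left := n - lt.2
  let bans0 := PySem.List.sorted (d.getD lt.1 []) (fun s => s)
  String.ofList (pvPosLoopA lt.1 (PySem.List.pyRange lt.1 0 (-1)) left bans0 [])

-- ===== PORT B =====
-- 'used = sum(b[k] <= c for b in group)' — summing booleans adds one per True; b[k] is always in
-- range (every ban in the group has exactly `length` characters and 0 ≤ k < length), so the
-- pyGet? default is never used.
def pvUsed (k : Int) (c : Char) (group : List String) : Int :=
  group.foldl (fun acc b => if (PySem.Str.pyGet? b k).getD 'a' ≤ c then acc + 1 else acc) 0

-- 'for i in range(26): …' with break; chr(97 + i) is ported as Char.ofNat (97 + i).toNat —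
-- exact, every i in the range is in [0, 26).  The loop variable c after the loop is the last
-- assigned value (range(26) is nonempty, so the dummy last argument is overwritten before use);
-- `prev` is the running previous total.
def pvForB (pos k : Int) (group : List String) : List Int → Int → Int → Char → Char × Int
  | [], left, _, c => (c, left)
  | i :: rest, left, prev, _ =>
    let c := Char.ofNat (97 + i).toNat
    let used := pvUsed k c group
    let avail : Int := 26 ^ (pos - 1).toNat - (used - prev)
    if left ≤ avail then (c, left)
    else pvForB pos k group rest (left - avail) used c

-- 'for pos in range(length, 0, -1): …'
def pvPosLoopB (length : Int) : List Int → Int → List String → List Char → List Char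
  | [], _, _, out => out
  | pos :: rest, left, group, out =>
    let k := length - pos
    let r := pvForB pos k group (PySem.List.pyRange 0 26 1) left 0 'a'
    pvPosLoopB length rest r.2
      (group.filter (fun b => (PySem.Str.pyGet? b k).getD 'a' == r.1)) (out ++ [r.1])

def solution_alt (n : Int) (bans : List String) : String :=
  let d := pvGroup bans        -- Source B's setdefault/append grouping loop: same fold as Source A's
  let lt := pvSelect n d       -- Source B's length loop is a verbatim copy of Source A's
  let left := n - lt.2
  String.ofList (pvPosLoopB lt.1 (PySem.List.pyRange lt.1 0 (-1)) left (d.getD lt.1 []) [])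

-- ===== PRECONDITION & SPEC =====
-- A raises no exception on any well-typed input, and B matches it everywhere: no Pre_.
def Spec_solution (n : Int) (bans : List String) (out : String) : Prop := out = solution_alt n bans
instance (n : Int) (bans : List String) (out : String) : Decidable (Spec_solution n bans out) := by
  unfold Spec_solution; infer_instance

-- ===== CLAIM (what is proved, stated in full; the proofs are below) =====
def Claim_equal_solution : Prop := ∀ (n : Int) (bans : List String),
  Dom_solution n bans → Spec_solution n bans (solution n bans)

-- ===== LEMMAS AND PROOFS =====

/-- the character a ban contributes at (Int) index `k` — exactly the ports' accessor. -/
def pvChAt (k : Int) (b : String) : Char := (PySem.Str.pyGet? b k).getD 'a'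

theorem pvChar_ofNat_toNat {d : Nat} (h : d < 26) : (Char.ofNat (97 + d)).toNat = 97 + d := by
  interval_cases d <;> rfl

theorem pvChAt_eq_getElem {b : String} {k : Nat} (hlen : k < b.toList.length) :
    pvChAt (k : Int) b = b.toList[k] := by
  unfold pvChAt
  have hbr : PySem.Str.pyGet? b (k : Int) = PySem.List.pyGet? b.toList (k : Int) := rfl
  rw [hbr, PySem.List.pyGet?_natCast, List.getElem?_eq_getElem hlen]
  rfl

theorem pvCHARS_getD : ∀ i : Nat, i < 26 →
    (PySem.List.pyGet? pvCHARS (i : Int)).getD 'a' = Char.ofNat (97 + i) := by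
  decide

-- the inner while walks the remaining suffix, consuming while the char at k is ≤ the candidate
theorem pvWhileA_eq (c : Char) (k : Int) : ∀ (R : List String) (new : Int),
    pvWhileA c k R new =
      (R.dropWhile (fun b => pvChAt k b ≤ c),
        new - ((R.takeWhile (fun b => pvChAt k b ≤ c)).length : Int)) := by
  intro R
  induction R with
  | nil => intro new; simp [pvWhileA]
  | cons b R ih =>
    intro new
    show (if c < (PySem.Str.pyGet? b k).getD 'a' then _ else pvWhileA c k R (new - 1)) = _
    by_cases hb : pvChAt k b ≤ c
    · rw [if_neg (show ¬ c < (PySem.Str.pyGet? b k).getD 'a' from not_lt.mpr hb), ih]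
      simp only [List.dropWhile_cons, List.takeWhile_cons, hb, decide_true, if_true,
        List.length_cons, Prod.mk.injEq]
      refine ⟨trivial, by push_cast; ring⟩
    · rw [if_pos (show c < (PySem.Str.pyGet? b k).getD 'a' from lt_of_not_ge hb)]
      simp [hb]

-- on a list whose predicate truth is downward closed, takeWhile/dropWhile are filters
theorem pvTakeWhile_filter {α : Type} (p : α → Bool) :
    ∀ {R : List α}, R.Pairwise (fun a b => p b → p a) →
      R.takeWhile p = R.filter p ∧ R.dropWhile p = R.filter (fun b => ! p b) := by
  intro R
  induction R with
  | nil => simp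
  | cons a R ih =>
    intro hp
    rcases List.pairwise_cons.mp hp with ⟨ha, hR⟩
    by_cases hpa : p a
    · rw [List.takeWhile_cons_of_pos hpa, List.dropWhile_cons_of_pos hpa,
        List.filter_cons_of_pos hpa, List.filter_cons_of_neg (by simp [hpa])]
      exact ⟨by rw [(ih hR).1], by rw [(ih hR).2]⟩
    · rw [List.takeWhile_cons_of_neg hpa, List.dropWhile_cons_of_neg hpa,
        List.filter_cons_of_neg hpa, List.filter_cons_of_pos (by simp [hpa])]
      have hnone : ∀ x ∈ R, ¬ p x := fun x hx hpx => hpa (ha x hx hpx)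
      constructor
      · exact (List.filter_eq_nil_iff.mpr hnone).symm
      · have : R.filter (fun b => ! p b) = R := by
          apply List.filter_eq_self.mpr
          intro x hx; simpa using hnone x hx
        rw [this]

-- ---- counting helpers for B ----

theorem pvUsed_countP (k : Int) (c : Char) (T : List String) :
    pvUsed k c T = ((T.countP (fun b => decide (pvChAt k b ≤ c)) : Nat) : Int) := by
  unfold pvUsed
  rw [PySem.List.foldl_ite_add_one (fun b => (PySem.Str.pyGet? b k).getD 'a' ≤ c) T 0]
  rw [Int.zero_add]
  congr 1

-- counting by an upper bound splits at any intermediate bound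
theorem pvCountP_split (f : String → Nat) (a b : Nat) (hab : a ≤ b) :
    ∀ (l : List String),
      l.countP (fun s => decide (f s ≤ b)) =
        l.countP (fun s => decide (f s ≤ a)) +
          l.countP (fun s => decide (a < f s) && decide (f s ≤ b)) := by
  intro l
  induction l with
  | nil => simp
  | cons x l ih =>
    simp only [List.countP_cons, ih]
    by_cases h1 : f x ≤ a
    · simp [h1, show f x ≤ b from le_trans h1 hab, show ¬ a < f x from by omega]
      omega
    · by_cases h2 : f x ≤ b
      · simp [h1, h2, show a < f x from by omega]
        omega
      · simp [h1, h2]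

theorem pvCons_le_iff {a b : Char} {l m : List Char} :
    (a :: l) ≤ (b :: m) ↔ a < b ∨ a = b ∧ l ≤ m := by
  rw [le_iff_lt_or_eq, le_iff_lt_or_eq, List.cons_lt_cons_iff, List.cons.injEq]
  tauto

theorem pvLex_getElem_le : ∀ (k : Nat) (l1 l2 : List Char) (h1 : k < l1.length)
    (h2 : k < l2.length), l1.take k = l2.take k → l1 ≤ l2 → l1[k] ≤ l2[k] := by
  intro k
  induction k with
  | zero =>
    intro l1 l2 h1 h2 _ hle
    match l1, l2, h1, h2 with
    | x :: xs, y :: ys, _, _ =>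
      rcases pvCons_le_iff.mp hle with h | ⟨rfl, _⟩
      · exact le_of_lt h
      · exact le_refl _
  | succ k ih =>
    intro l1 l2 h1 h2 htake hle
    match l1, l2, h1, h2 with
    | x :: xs, y :: ys, h1, h2 =>
      rw [List.take_succ_cons, List.take_succ_cons] at htake
      obtain ⟨rfl, htk⟩ := List.cons.inj htake
      rcases pvCons_le_iff.mp hle with h | ⟨-, hxy⟩
      · exact absurd h (lt_irrefl _)
      · simpa using ih xs ys (by simp only [List.length_cons] at h1; omega)
          (by simp only [List.length_cons] at h2; omega) htk hxy

theorem pvChAt_pairwise (S : List String) (k : Nat)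
    (hlen : ∀ b ∈ S, k < b.toList.length)
    (hpre : ∀ a ∈ S, ∀ b ∈ S, a.toList.take k = b.toList.take k)
    (hs : S.Pairwise (· ≤ ·)) :
    S.Pairwise (fun a b => pvChAt (k:Int) a ≤ pvChAt (k:Int) b) := by
  refine List.Pairwise.imp_of_mem ?_ hs
  intro a b ha hb hab
  rw [pvChAt_eq_getElem (hlen a ha), pvChAt_eq_getElem (hlen b hb)]
  exact pvLex_getElem_le k _ _ (hlen a ha) (hlen b hb) (hpre a ha b hb)
    (String.le_iff_toList_le.mp hab)

-- ---- the 26-candidate loops of A and B agree ----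

theorem pvForAB (ℓ : Int) (p k : Nat) (hk : ℓ - ((p:Int)+1) = (k:Int))
    (S T : List String) (hST : S.Perm T)
    (hmono : S.Pairwise (fun a b => pvChAt (k:Int) a ≤ pvChAt (k:Int) b)) :
    ∀ (m i : Nat), i + m = 26 → ∀ (left : Int) (prev : Char),
    pvForA ℓ ((p:Int)+1) (PySem.List.pyRange (i:Int) 26 1) left
        (S.filter (fun b => decide (i = 0) ||
          decide (96 + (i:Int) < ((pvChAt (k:Int) b).toNat : Int)))) prev =
      pvForB ((p:Int)+1) (k:Int) T (PySem.List.pyRange (i:Int) 26 1) left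
        (if i = 0 then 0
         else ((T.countP (fun b => decide ((pvChAt (k:Int) b).toNat ≤ 96 + i)) : Nat) : Int))
        prev := by
  intro m
  induction m with
  | zero =>
    intro i hi left prev
    have h26 : i = 26 := by omega
    subst h26
    rw [PySem.List.pyRange_one_eq_nil (by norm_num)]
    rfl
  | succ m ih =>
    intro i hi left prev
    have hi26 : i < 26 := by omega
    set ci : Char := Char.ofNat (97 + i) with hci
    have hciN : ci.toNat = 97 + i := pvChar_ofNat_toNat hi26
    set Pi : String → Bool := fun b => decide (i = 0) ||
      decide (96 + (i:Int) < ((pvChAt (k:Int) b).toNat : Int)) with hPi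
    set R : List String := S.filter Pi with hR
    set q : String → Bool := fun b => decide (pvChAt (k:Int) b ≤ ci) with hq
    set prevv : Int := (if i = 0 then 0
      else ((T.countP (fun b => decide ((pvChAt (k:Int) b).toNat ≤ 96 + i)) : Nat) : Int))
      with hprevv
    have hmonoR : R.Pairwise (fun a b => q b = true → q a = true) := by
      have h1 : R.Pairwise (fun a b => pvChAt (k:Int) a ≤ pvChAt (k:Int) b) := by
        rw [hR]
        exact hmono.sublist List.filter_sublist
      refine h1.imp ?_
      intro a b hab hqb
      rw [hq, decide_eq_true_iff] at hqb ⊢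
      exact le_trans hab hqb
    have htd := pvTakeWhile_filter q hmonoR
    have hchar_le : ∀ b : String, (q b = true) ↔ (pvChAt (k:Int) b).toNat ≤ 97 + i := by
      intro b
      rw [hq, decide_eq_true_iff]
      constructor
      · intro h; have : (pvChAt (k:Int) b).toNat ≤ ci.toNat := h; omega
      · intro h; show (pvChAt (k:Int) b).toNat ≤ ci.toNat; omega
    -- the block consumed by A at candidate i is B's count difference
    have hcount : ((R.takeWhile q).length : Int) = pvUsed (k:Int) ci T - prevv := by
      rw [htd.1, hR, List.filter_filter, ← List.countP_eq_length_filter, hST.countP_eq _,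
        pvUsed_countP, hprevv]
      by_cases h0 : i = 0
      · subst h0
        rw [if_pos rfl]
        have hcongr : T.countP (fun b => q b && Pi b) =
            T.countP (fun b => decide (pvChAt (k:Int) b ≤ ci)) := by
          refine List.countP_congr (fun b _ => ?_)
          simp [hq, hPi]
        rw [hcongr]
        ring
      · rw [if_neg h0]
        have hA : T.countP (fun b => decide (pvChAt (k:Int) b ≤ ci)) =
            T.countP (fun b => decide ((pvChAt (k:Int) b).toNat ≤ 97 + i)) := by
          refine List.countP_congr (fun b _ => ?_)
          have hle := hchar_le b
          rw [hq, decide_eq_true_iff] at hle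
          simp only [decide_eq_true_iff]
          rw [hle]
        have hB : T.countP (fun b => q b && Pi b) =
            T.countP (fun b => decide (96 + i < (pvChAt (k:Int) b).toNat) &&
              decide ((pvChAt (k:Int) b).toNat ≤ 97 + i)) := by
          refine List.countP_congr (fun b _ => ?_)
          have hle := hchar_le b
          rw [hq, decide_eq_true_iff] at hle
          simp only [hq, hPi, Bool.and_eq_true, Bool.or_eq_true, decide_eq_true_iff]
          rw [hle]
          omega
        have hsplit := pvCountP_split (fun b => (pvChAt (k:Int) b).toNat) (96 + i) (97 + i)
          (by omega) T
        rw [hB, hA, hsplit]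
        push_cast
        ring
    -- peel one candidate from both loops
    rw [PySem.List.pyRange_one_cons (by exact_mod_cast hi26)]
    have hciB : Char.ofNat (97 + (i:Int)).toNat = ci := by
      rw [hci, show (97 + (i:Int)).toNat = 97 + i from by omega]
    have hstepA : pvForA ℓ ((p:Int)+1) ((i:Int) :: PySem.List.pyRange ((i:Int)+1) 26 1) left R prev =
        if left ≤ 26 ^ p - ((R.takeWhile q).length : Int) then (ci, left)
        else pvForA ℓ ((p:Int)+1) (PySem.List.pyRange ((i:Int)+1) 26 1)
          (left - (26 ^ p - ((R.takeWhile q).length : Int))) (R.dropWhile q) ci := by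
      show (let char := (PySem.List.pyGet? pvCHARS (i:Int)).getD 'a'
            let new : Int := 26 ^ ((((p:Int)+1) - 1).toNat)
            let r := pvWhileA char (ℓ - ((p:Int)+1)) R new
            if left ≤ r.2 then (char, left)
            else pvForA ℓ ((p:Int)+1) (PySem.List.pyRange ((i:Int)+1) 26 1) (left - r.2) r.1 char) = _
      simp only [pvCHARS_getD i hi26, hk, pvWhileA_eq,
        show ((((p:Int)+1) - 1).toNat) = p from by omega, ← hci, ← hq]
    have hstepB : pvForB ((p:Int)+1) (k:Int) T ((i:Int) :: PySem.List.pyRange ((i:Int)+1) 26 1)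
        left prevv prev =
        if left ≤ 26 ^ p - ((R.takeWhile q).length : Int) then (ci, left)
        else pvForB ((p:Int)+1) (k:Int) T (PySem.List.pyRange ((i:Int)+1) 26 1)
          (left - (26 ^ p - ((R.takeWhile q).length : Int))) (pvUsed (k:Int) ci T) ci := by
      show (let c := Char.ofNat (97 + (i:Int)).toNat
            let used := pvUsed (k:Int) c T
            let avail : Int := 26 ^ ((((p:Int)+1) - 1).toNat) - (used - prevv)
            if left ≤ avail then (c, left)
            else pvForB ((p:Int)+1) (k:Int) T (PySem.List.pyRange ((i:Int)+1) 26 1)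
              (left - avail) used c) = _
      simp only [hciB, show ((((p:Int)+1) - 1).toNat) = p from by omega]
      rw [show 26 ^ p - (pvUsed (k:Int) ci T - prevv)
            = 26 ^ p - ((R.takeWhile q).length : Int) from by rw [hcount]]
    rw [hstepA, hstepB]
    by_cases hbr : left ≤ 26 ^ p - ((R.takeWhile q).length : Int)
    · rw [if_pos hbr, if_pos hbr]
    · rw [if_neg hbr, if_neg hbr]
      have hdrop : R.dropWhile q = S.filter (fun b => decide (i + 1 = 0) ||
          decide (96 + ((i+1 : Nat):Int) < ((pvChAt (k:Int) b).toNat : Int))) := by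
        rw [htd.2, hR, List.filter_filter]
        apply List.filter_congr
        intro b _
        have hle := hchar_le b
        rw [Bool.eq_iff_iff, Bool.and_eq_true]
        have hB : ((decide (i + 1 = 0) ||
            decide (96 + ((i+1 : Nat):Int) < ((pvChAt (k:Int) b).toNat : Int))) = true)
            ↔ (96 + ((i:Int) + 1) < ((pvChAt (k:Int) b).toNat : Int)) := by
          rw [Bool.or_eq_true, decide_eq_true_iff, decide_eq_true_iff]
          constructor
          · rintro (h | h)
            · omega
            · push_cast at h
              omega
          · intro h
            right
            push_cast
            omega
        rw [hB]
        constructor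
        · rintro ⟨hnq, -⟩
          have h2 : ¬ ((pvChAt (k:Int) b).toNat ≤ 97 + i) := fun hcon => by
            have := hle.mpr hcon
            simp [this] at hnq
          omega
        · intro h
          have hPib : Pi b = true := by
            rw [hPi, Bool.or_eq_true, decide_eq_true_iff, decide_eq_true_iff]
            right
            omega
          refine ⟨?_, hPib⟩
          have h2 : ¬ (q b = true) := by
            rw [hle]
            omega
          simp at h2 ⊢
          simp [h2]
      have hnext : pvUsed (k:Int) ci T = (if i + 1 = 0 then 0
          else ((T.countP (fun b => decide ((pvChAt (k:Int) b).toNat ≤ 96 + (i+1))) : Nat) : Int)) := by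
        rw [if_neg (Nat.succ_ne_zero i), pvUsed_countP]
        congr 1
        refine List.countP_congr (fun b _ => ?_)
        have hle := hchar_le b
        rw [hq, decide_eq_true_iff] at hle
        simp only [decide_eq_true_iff]
        rw [hle]
        omega
      rw [hdrop, hnext]
      have hcast : ((i+1 : Nat):Int) = (i:Int) + 1 := by push_cast; ring
      have := ih (i+1) (by omega) (left - (26 ^ p - ((R.takeWhile q).length : Int))) ci
      rw [hcast] at this
      exact this

-- ---- the position loops of A and B agree ----

theorem pvPosLoop_equiv (ℓ : Int) : ∀ (p k : Nat) (S T : List String) (left : Int)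
    (out : List Char),
    ℓ = ((k + p : Nat) : Int) → S.Perm T → S.Pairwise (· ≤ ·) →
    (∀ b ∈ S, b.toList.length = k + p) →
    (∀ a ∈ S, ∀ b ∈ S, a.toList.take k = b.toList.take k) →
    pvPosLoopA ℓ (PySem.List.pyRange ((p : Nat) : Int) 0 (-1)) left S out =
      pvPosLoopB ℓ (PySem.List.pyRange ((p : Nat) : Int) 0 (-1)) left T out := by
  intro p
  induction p with
  | zero =>
    intro k S T left out _ _ _ _ _
    rw [show (((0:Nat) : Nat) : Int) = (0 : Int) from rfl,
      PySem.List.pyRange_neg_one_eq_nil (by norm_num)]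
    rfl
  | succ p ihp =>
    intro k S T left out hℓ hST hsorted hlen hpre
    have hk : ℓ - ((p:Int)+1) = (k:Int) := by rw [hℓ]; push_cast; ring
    have hlen' : ∀ b ∈ S, k < b.toList.length := fun b hb => by
      have := hlen b hb
      omega
    have hmono := pvChAt_pairwise S k hlen' hpre hsorted
    have hfilter0 : S.filter (fun b => decide ((0:Nat) = 0) ||
        decide (96 + ((0:Nat):Int) < ((pvChAt (k:Int) b).toNat : Int))) = S :=
      List.filter_eq_self.mpr (fun b _ => by simp)
    have hforAB := pvForAB ℓ p k hk S T hST hmono 26 0 rfl left 'a'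
    rw [hfilter0, if_pos rfl] at hforAB
    rw [show (((0:Nat)):Int) = (0:Int) from rfl] at hforAB
    have hpeel : PySem.List.pyRange (((p+1 : Nat)) : Int) 0 (-1) =
        (((p+1:Nat)):Int) :: PySem.List.pyRange ((((p+1:Nat)):Int) - 1) 0 (-1) :=
      PySem.List.pyRange_neg_one_cons (by exact_mod_cast Nat.succ_pos p)
    rw [hpeel]
    have hposcast : (((p+1:Nat)):Int) = (p:Int) + 1 := by push_cast; ring
    set r : Char × Int := pvForB ((p:Int)+1) (k:Int) T (PySem.List.pyRange 0 26 1) left 0 'a'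
      with hr
    have hstepA : pvPosLoopA ℓ ((((p+1:Nat)):Int) :: PySem.List.pyRange ((((p+1:Nat)):Int) - 1) 0 (-1))
        left S out =
        pvPosLoopA ℓ (PySem.List.pyRange ((((p+1:Nat)):Int) - 1) 0 (-1)) r.2
          (S.filter (fun b => pvChAt (k:Int) b == r.1)) (out ++ [r.1]) := by
      show pvPosLoopA ℓ _ (pvDefineChar ℓ (((p+1:Nat)):Int) left S).2.1
          (pvDefineChar ℓ (((p+1:Nat)):Int) left S).2.2
          (out ++ [(pvDefineChar ℓ (((p+1:Nat)):Int) left S).1]) = _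
      have hcall : pvDefineChar ℓ (((p+1:Nat)):Int) left S =
          (r.1, r.2, S.filter (fun b => pvChAt (k:Int) b == r.1)) := by
        unfold pvDefineChar
        rw [hposcast, hforAB, show ℓ - ((p:Int)+1) = (k:Int) from hk]
        rfl
      rw [hcall]
    have hstepB : pvPosLoopB ℓ ((((p+1:Nat)):Int) :: PySem.List.pyRange ((((p+1:Nat)):Int) - 1) 0 (-1))
        left T out =
        pvPosLoopB ℓ (PySem.List.pyRange ((((p+1:Nat)):Int) - 1) 0 (-1)) r.2
          (T.filter (fun b => pvChAt (k:Int) b == r.1)) (out ++ [r.1]) := by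
      show (let k' := ℓ - (((p+1:Nat)):Int)
            let r' := pvForB (((p+1:Nat)):Int) k' T (PySem.List.pyRange 0 26 1) left 0 'a'
            pvPosLoopB ℓ (PySem.List.pyRange ((((p+1:Nat)):Int) - 1) 0 (-1)) r'.2
              (T.filter (fun b => (PySem.Str.pyGet? b k').getD 'a' == r'.1)) (out ++ [r'.1])) = _
      simp only [hposcast, hk, ← hr]
      rfl
    rw [hstepA, hstepB, show (((p+1:Nat)):Int) - 1 = ((p:Nat):Int) from by push_cast; ring]
    apply ihp (k+1)
    · rw [hℓ]; push_cast; ring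
    · exact hST.filter _
    · exact hsorted.sublist List.filter_sublist
    · intro b hb
      have := hlen b (List.mem_of_mem_filter hb)
      omega
    · intro a ha b hb
      have haS := List.mem_of_mem_filter ha
      have hbS := List.mem_of_mem_filter hb
      have hca : pvChAt (k:Int) a = r.1 := by
        have := (List.mem_filter.mp ha).2
        rwa [beq_iff_eq] at this
      have hcb : pvChAt (k:Int) b = r.1 := by
        have := (List.mem_filter.mp hb).2
        rwa [beq_iff_eq] at this
      rw [List.take_add_one, List.take_add_one, hpre a haS b hbS]
      congr 1
      rw [List.getElem?_eq_getElem (hlen' a haS), List.getElem?_eq_getElem (hlen' b hbS)]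
      rw [← pvChAt_eq_getElem (hlen' a haS), ← pvChAt_eq_getElem (hlen' b hbS), hca, hcb]

-- the grouping dict maps L to the bans of length L, in order
theorem pvGroup_getD (bans : List String) (L : Int) :
    (pvGroup bans).getD L [] = bans.filter (fun b => PySem.Str.len b == L) := by
  unfold pvGroup
  have hfold : bans.foldl (fun (d : PySem.Dict Int (List String)) ban =>
        d.modify (PySem.Str.len ban) [] (· ++ [ban])) PySem.Dict.empty =
      (bans.map (fun b => (PySem.Str.len b, b))).foldl
        (fun (d : PySem.Dict Int (List String)) p => d.modify p.1 [] (· ++ [p.2]))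
        PySem.Dict.empty :=
    by rw [List.foldl_map]
  rw [hfold, PySem.Dict.getD_foldl_modify_append, PySem.Dict.getD_empty,
    List.filter_map, List.map_map, List.nil_append]
  have h1 : ((fun (p : Int × String) => p.1 == L) ∘ fun b => (PySem.Str.len b, b)) =
      (fun b => PySem.Str.len b == L) := rfl
  have h2 : ((fun (p : Int × String) => p.2) ∘ fun b => (PySem.Str.len b, b)) = id := rfl
  rw [h1, h2, List.map_id]

-- the length-selection loop always returns a positive length
theorem pvSelectGo_pos (n : Int) (d : PySem.Dict Int (List String)) :
    ∀ (range : List Int) (turn last : Int), 1 ≤ last → (∀ l ∈ range, 1 ≤ l) →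
    1 ≤ (pvSelectGo n d range turn last).1 := by
  intro range
  induction range with
  | nil => intro turn last hlast _; exact hlast
  | cons l rest ih =>
    intro turn last hlast hmem
    by_cases hbr : n ≤ turn + (26 ^ l.toNat - PySem.List.len (d.getD l []))
    · simp only [pvSelectGo, if_pos hbr]
      exact hmem l (List.mem_cons_self ..)
    · simp only [pvSelectGo, if_neg hbr]
      exact ih _ l (hmem l (List.mem_cons_self ..))
        (fun x hx => hmem x (List.mem_cons_of_mem _ hx))

-- ===== VERDICT (by name: the statement is the Claim_ definition above) =====
theorem solution_spec : Claim_equal_solution := by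
  intro n bans hdom
  show solution n bans = solution_alt n bans
  simp only [solution, solution_alt]
  set q0 := pvSelect n (pvGroup bans) with hq0
  set ℓ : Int := q0.1 with hℓdef
  have hℓ1 : 1 ≤ ℓ := by
    rw [hℓdef, hq0]
    exact pvSelectGo_pos n (pvGroup bans) (PySem.List.pyRange 1 1000000 1) 0 1 le_rfl
      (fun l hl => (PySem.List.mem_pyRange_one.mp hl).1)
  have hgd := pvGroup_getD bans ℓ
  set S0 : List String := (pvGroup bans).getD ℓ [] with hS0def
  have hflen : ∀ b ∈ S0, b.toList.length = 0 + ℓ.toNat := by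
    intro b hb
    rw [hgd, List.mem_filter] at hb
    have h2 : PySem.Str.len b = ℓ := by simpa using hb.2
    have := PySem.Str.len_eq b
    omega
  set S : List String := PySem.List.sorted S0 (fun s => s) with hSdef
  have hperm : S.Perm S0 := PySem.List.sorted_perm S0 (fun s => s) false
  have hsorted : S.Pairwise (· ≤ ·) := PySem.List.sorted_pairwise S0 (fun s => s)
  have hcast : ((ℓ.toNat : Nat) : Int) = ℓ := by omega
  have := pvPosLoop_equiv ℓ ℓ.toNat 0 S S0 (n - q0.2) [] (by omega) hperm hsorted
    (fun b hb => hflen b (hperm.mem_iff.mp hb))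
    (fun a _ b _ => by simp)
  rw [hcast] at this
  rw [this]
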